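-- pv_equiv track=rewrite | github.com/Myriad-Dreamin/pycanalysis | pycanalysis.py | match_identifier_r
-- ===== SOURCE A (Python) =====
-- def match_identifier_r(maybe_bad_id):
--     """
--     match a valid c-like identifier from suffix as long as possible
--     :param maybe_bad_id:
--     :return:
--     """
--     for i, s in enumerate(reversed(maybe_bad_id)):  # type: int, str
--         if s == '_' or s.isalnum():
--             continue
--         else:
--             i = len(maybe_bad_id) - i
--             while i < len(maybe_bad_id):
--                 if maybe_bad_id[i].isdigit():
--                     i += 1
--                 else:
--                     return maybe_bad_id[i:]
--             return ''
--     return maybe_bad_id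
-- ===== SOURCE B (Python) =====
-- def match_identifier_r(maybe_bad_id):
--     """
--     match a valid c-like identifier from suffix as long as possible
--     (forward single pass tracking the last invalid character, then digit skip)
--     """
--     last_bad = -1
--     for i, c in enumerate(maybe_bad_id):
--         if not (c == '_' or c.isalnum()):
--             last_bad = i
--     if last_bad == -1:
--         return maybe_bad_id
--     j = last_bad + 1
--     n = len(maybe_bad_id)
--     while j < n and maybe_bad_id[j].isdigit():
--         j += 1
--     return maybe_bad_id[j:]
-- ===== Notes on version B (the rewrite author's own statement) =====
-- stated objective: alternative
-- what changed: Replaces A's reverse-enumerate scan with early stop by a forward single pass that tracks the index of the last invalid character, followed by the same digit skip.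
import Mathlib
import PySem

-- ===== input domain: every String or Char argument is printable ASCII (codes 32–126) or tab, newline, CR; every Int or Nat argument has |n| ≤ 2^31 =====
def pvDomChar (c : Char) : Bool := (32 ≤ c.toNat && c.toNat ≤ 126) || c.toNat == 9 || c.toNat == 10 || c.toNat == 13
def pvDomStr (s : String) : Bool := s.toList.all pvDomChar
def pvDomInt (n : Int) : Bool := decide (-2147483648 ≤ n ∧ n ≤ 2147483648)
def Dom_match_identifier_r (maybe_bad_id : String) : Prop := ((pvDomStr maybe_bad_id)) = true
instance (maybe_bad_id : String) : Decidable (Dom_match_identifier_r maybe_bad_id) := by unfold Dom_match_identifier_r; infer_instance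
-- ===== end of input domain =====

-- B replaces A's reverse-enumerate early stop by a forward single pass tracking the
-- index of the last invalid character (objective: alternative decomposition, same cost).

-- ===== PORT A =====
-- A's inner 'while i < len: if digit: i += 1 else return s[i:]; return '''
def pvSkipA (s : List Char) (i : Nat) : List Char :=
  if h : i < s.length then
    if PySem.Chars.isdigit s[i] then pvSkipA s (i + 1)
    else PySem.List.slice s (some (i : Int)) none
  else []
termination_by s.length - i

-- A's 'for i, c in enumerate(reversed(s))' loop; 'none' = fell through (return maybe_bad_id)
def pvLoopA (s : List Char) (rev : List Char) (i : Nat) : Option (List Char) :=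
  match rev with
  | [] => none
  | c :: rest =>
    if c == '_' || PySem.Chars.isalnum c then pvLoopA s rest (i + 1)
    else some (pvSkipA s (s.length - i))

def match_identifier_r (maybe_bad_id : String) : String :=
  match pvLoopA maybe_bad_id.toList maybe_bad_id.toList.reverse 0 with
  | none => maybe_bad_id
  | some l => String.ofList l

-- ===== PORT B =====
def pvBad (c : Char) : Bool := !(c == '_' || PySem.Chars.isalnum c)

-- B's forward pass: index of the last bad character, -1 if none
def pvLastBad (s : List Char) : Int :=
  (PySem.List.enumerate s 0).foldl (fun lb ic => if pvBad ic.2 then ic.1 else lb) (-1)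

-- B's 'while j < n and s[j].isdigit(): j += 1; return s[j:]'
def pvSkipB (s : List Char) (j : Nat) : List Char :=
  if h : j < s.length then
    if PySem.Chars.isdigit s[j] then pvSkipB s (j + 1)
    else PySem.List.slice s (some (j : Int)) none
  else PySem.List.slice s (some (j : Int)) none
termination_by s.length - j

def match_identifier_r_alt (maybe_bad_id : String) : String :=
  let lb := pvLastBad maybe_bad_id.toList
  if lb == -1 then maybe_bad_id
  else String.ofList (pvSkipB maybe_bad_id.toList (lb + 1).toNat)

-- ===== PRECONDITION & SPEC =====
def Spec_match_identifier_r (maybe_bad_id : String) (out : String) : Prop := out = match_identifier_r_alt maybe_bad_id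
instance (maybe_bad_id : String) (out : String) : Decidable (Spec_match_identifier_r maybe_bad_id out) := by unfold Spec_match_identifier_r; infer_instance

-- ===== CLAIM (what is proved, stated in full; the proofs are below) =====
def Claim_equal_match_identifier_r : Prop := ∀ (maybe_bad_id : String), Dom_match_identifier_r maybe_bad_id → Spec_match_identifier_r maybe_bad_id (match_identifier_r maybe_bad_id)

-- ===== LEMMAS AND PROOFS =====

-- the two digit-skip loops agree (they differ only past the end, where both yield [])
theorem pvSkip_eq (s : List Char) (i : Nat) : pvSkipA s i = pvSkipB s i := by
  unfold pvSkipA pvSkipB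
  split
  · split
    · exact pvSkip_eq s (i + 1)
    · rfl
  · rename_i h
    rw [PySem.List.slice_from_natCast]
    rw [List.drop_eq_nil_of_le (by omega)]
termination_by s.length - i

-- A's outer loop finds the first bad character of 'rev'
theorem pvLoopA_char (s : List Char) (rev : List Char) (i : Nat) :
    pvLoopA s rev i =
      match rev.findIdx? pvBad with
      | none => none
      | some k => some (pvSkipA s (s.length - (i + k))) := by
  induction rev generalizing i with
  | nil => simp [pvLoopA]
  | cons c rest ih =>
    by_cases hc : (c == '_' || PySem.Chars.isalnum c) = true
    · have hb : pvBad c = false := by simp [pvBad, hc]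
      rw [pvLoopA, if_pos hc, ih (i + 1), List.findIdx?_cons, hb]
      cases hfind : rest.findIdx? pvBad with
      | none => simp
      | some k =>
        simp only [Bool.false_eq_true, if_false, Option.map_some]
        rw [show i + 1 + k = i + (k + 1) from by omega]
    · have hb : pvBad c = true := by simp [pvBad]; simpa using hc
      rw [pvLoopA, if_neg hc, List.findIdx?_cons, hb]
      simp

-- B's fold computes the last bad index; related to the first bad index of the reverse
theorem pvLastBad_char (s : List Char) :
    (s.reverse.findIdx? pvBad = none ∧ pvLastBad s = -1) ∨
      (∃ k, s.reverse.findIdx? pvBad = some k ∧ k < s.length ∧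
        pvLastBad s = (s.length : Int) - 1 - k) := by
  induction s using List.reverseRecOn with
  | nil => left; exact ⟨rfl, rfl⟩
  | append_singleton s c ih =>
    have hl : pvLastBad (s ++ [c]) =
        if pvBad c then (s.length : Int) else pvLastBad s := by
      unfold pvLastBad
      rw [PySem.List.enumerate_append, List.foldl_append]
      simp
    by_cases hb : pvBad c = true
    · right
      refine ⟨0, ?_, by simp, ?_⟩
      · rw [List.reverse_append]; simp [List.findIdx?_cons, hb]
      · rw [hl, if_pos hb]; simp
    · have hb' : pvBad c = false := by simpa using hb
      have hrev : (s ++ [c]).reverse.findIdx? pvBad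
          = (s.reverse.findIdx? pvBad).map (· + 1) := by
        rw [List.reverse_append]; simp [List.findIdx?_cons, hb']
      rcases ih with ⟨h1, h2⟩ | ⟨k, h1, h2, h3⟩
      · left
        constructor
        · rw [hrev, h1]; rfl
        · rw [hl, if_neg hb, h2]
      · right
        refine ⟨k + 1, ?_, by simp; omega, ?_⟩
        · rw [hrev, h1]; rfl
        · rw [hl, if_neg hb, h3]
          simp only [List.length_append, List.length_singleton]
          push_cast; ring

-- ===== VERDICT (by name: the statement is the Claim_ definition above) =====
theorem match_identifier_r_spec : Claim_equal_match_identifier_r := by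
  intro s _
  unfold Spec_match_identifier_r match_identifier_r match_identifier_r_alt
  rw [pvLoopA_char]
  rcases pvLastBad_char s.toList with ⟨h1, h2⟩ | ⟨k, h1, h2, h3⟩
  · rw [h1, h2]; rfl
  · rw [h1]
    have hne : (((s.toList.length : Int) - 1 - k) == -1) = false := by
      rw [beq_eq_false_iff_ne]; omega
    simp only [h3, hne, Bool.false_eq_true, if_false]
    have harg : ((s.toList.length : Int) - 1 - k + 1).toNat = s.toList.length - k := by
      omega
    rw [Nat.zero_add, harg, pvSkip_eq]
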